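-- pv_equiv track=rewrite | github.com/my-hon/ntl-gnn-gapfilling | ntl_graph_accel/graph_builder.py | bresenham_3d
-- ===== SOURCE A (Python) =====
-- def bresenham_3d(start, end):
--     """
--     标准 3D Bresenham 直线算法。
--     精确复制参考实现的逻辑。
--     返回路径点列表，包含起点和终点。
--     """
--     x1, y1, z1 = int(start[0]), int(start[1]), int(start[2])
--     x2, y2, z2 = int(end[0]), int(end[1]), int(end[2])
--
--     points = [(x1, y1, z1)]
--     dx = abs(x2 - x1)
--     dy = abs(y2 - y1)
--     dz = abs(z2 - z1)
--     xs = 1 if x2 > x1 else -1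
--     ys = 1 if y2 > y1 else -1
--     zs = 1 if z2 > z1 else -1
--
--     if dx >= dy and dx >= dz:
--         p1 = 2 * dy - dx
--         p2 = 2 * dz - dx
--         while x1 != x2:
--             x1 += xs
--             if p1 >= 0:
--                 y1 += ys
--                 p1 -= 2 * dx
--             if p2 >= 0:
--                 z1 += zs
--                 p2 -= 2 * dx
--             p1 += 2 * dy
--             p2 += 2 * dz
--             points.append((x1, y1, z1))
--     elif dy >= dx and dy >= dz:
--         p1 = 2 * dx - dy
--         p2 = 2 * dz - dy
--         while y1 != y2:
--             y1 += ys
--             if p1 >= 0: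
--                 x1 += xs
--                 p1 -= 2 * dy
--             if p2 >= 0:
--                 z1 += zs
--                 p2 -= 2 * dy
--             p1 += 2 * dx
--             p2 += 2 * dz
--             points.append((x1, y1, z1))
--     else:
--         p1 = 2 * dy - dz
--         p2 = 2 * dx - dz
--         while z1 != z2:
--             z1 += zs
--             if p1 >= 0:
--                 y1 += ys
--                 p1 -= 2 * dz
--             if p2 >= 0:
--                 x1 += xs
--                 p2 -= 2 * dz
--             p1 += 2 * dy
--             p2 += 2 * dx
--             points.append((x1, y1, z1))
--
--     return points
-- ===== SOURCE B (Python) =====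
-- def bresenham_3d(start, end):
--     """Closed-form 3D Bresenham: each coordinate computed directly from the
--     step index i instead of maintained error accumulators."""
--     x1, y1, z1 = int(start[0]), int(start[1]), int(start[2])
--     x2, y2, z2 = int(end[0]), int(end[1]), int(end[2])
--     dx, dy, dz = abs(x2 - x1), abs(y2 - y1), abs(z2 - z1)
--     xs = 1 if x2 > x1 else -1
--     ys = 1 if y2 > y1 else -1
--     zs = 1 if z2 > z1 else -1
--     if dx >= dy and dx >= dz:
--         n = dx
--         f = lambda i: (x1 + xs * i,
--                        y1 + ys * ((2 * i * dy + n) // (2 * n)),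
--                        z1 + zs * ((2 * i * dz + n) // (2 * n)))
--     elif dy >= dx and dy >= dz:
--         n = dy
--         f = lambda i: (x1 + xs * ((2 * i * dx + n) // (2 * n)),
--                        y1 + ys * i,
--                        z1 + zs * ((2 * i * dz + n) // (2 * n)))
--     else:
--         n = dz
--         f = lambda i: (x1 + xs * ((2 * i * dx + n) // (2 * n)),
--                        y1 + ys * ((2 * i * dy + n) // (2 * n)),
--                        z1 + zs * i)
--     return [(x1, y1, z1)] + [f(i) for i in range(1, n + 1)]
-- ===== Notes on version B (the rewrite author's own statement) =====
-- stated objective: alternative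
-- what changed: B replaces A's three incremental Bresenham loops with maintained error accumulators p1/p2 by a single list comprehension that computes each secondary coordinate in closed form from the step index i via floor((2*i*d + n)//(2*n)).
import Mathlib
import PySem

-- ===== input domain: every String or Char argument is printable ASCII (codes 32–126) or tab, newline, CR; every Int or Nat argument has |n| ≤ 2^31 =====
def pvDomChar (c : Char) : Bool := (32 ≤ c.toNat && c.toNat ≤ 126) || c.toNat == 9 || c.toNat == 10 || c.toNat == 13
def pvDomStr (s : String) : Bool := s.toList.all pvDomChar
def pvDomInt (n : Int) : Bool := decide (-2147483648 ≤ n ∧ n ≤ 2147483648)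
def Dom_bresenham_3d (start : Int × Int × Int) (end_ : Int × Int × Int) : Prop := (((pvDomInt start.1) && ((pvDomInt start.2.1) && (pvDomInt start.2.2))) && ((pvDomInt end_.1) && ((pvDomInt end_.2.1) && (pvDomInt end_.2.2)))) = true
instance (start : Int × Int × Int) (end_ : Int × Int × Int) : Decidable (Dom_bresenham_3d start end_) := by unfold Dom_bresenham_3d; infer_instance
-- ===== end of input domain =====

-- B replaces A's incremental error accumulators p1/p2 with a closed-form
-- floor expression per step index; alternative decomposition, not claimed faster.

-- ===== PORT A =====
-- the `while x1 != x2` loop of the dx-dominant branch; fuel = dx (the loop runs exactly dx times)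
def pvLoopX (x2 xs ys zs dx dy dz : Int) : Nat → Int → Int → Int → Int → Int → List (Int × Int × Int)
  | 0, _, _, _, _, _ => []
  | fuel + 1, x1, y1, z1, p1, p2 =>
    if x1 = x2 then []
    else
      (x1 + xs, (if p1 ≥ 0 then y1 + ys else y1), (if p2 ≥ 0 then z1 + zs else z1)) ::
        pvLoopX x2 xs ys zs dx dy dz fuel (x1 + xs)
          (if p1 ≥ 0 then y1 + ys else y1) (if p2 ≥ 0 then z1 + zs else z1)
          ((if p1 ≥ 0 then p1 - 2 * dx else p1) + 2 * dy)
          ((if p2 ≥ 0 then p2 - 2 * dx else p2) + 2 * dz)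

-- the `while y1 != y2` loop of the dy-dominant branch
def pvLoopY (y2 xs ys zs dx dy dz : Int) : Nat → Int → Int → Int → Int → Int → List (Int × Int × Int)
  | 0, _, _, _, _, _ => []
  | fuel + 1, x1, y1, z1, p1, p2 =>
    if y1 = y2 then []
    else
      ((if p1 ≥ 0 then x1 + xs else x1), y1 + ys, (if p2 ≥ 0 then z1 + zs else z1)) ::
        pvLoopY y2 xs ys zs dx dy dz fuel
          (if p1 ≥ 0 then x1 + xs else x1) (y1 + ys) (if p2 ≥ 0 then z1 + zs else z1)
          ((if p1 ≥ 0 then p1 - 2 * dy else p1) + 2 * dx)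
          ((if p2 ≥ 0 then p2 - 2 * dy else p2) + 2 * dz)

-- the `while z1 != z2` loop of the final branch
def pvLoopZ (z2 xs ys zs dx dy dz : Int) : Nat → Int → Int → Int → Int → Int → List (Int × Int × Int)
  | 0, _, _, _, _, _ => []
  | fuel + 1, x1, y1, z1, p1, p2 =>
    if z1 = z2 then []
    else
      ((if p2 ≥ 0 then x1 + xs else x1), (if p1 ≥ 0 then y1 + ys else y1), z1 + zs) ::
        pvLoopZ z2 xs ys zs dx dy dz fuel
          (if p2 ≥ 0 then x1 + xs else x1) (if p1 ≥ 0 then y1 + ys else y1) (z1 + zs)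
          ((if p1 ≥ 0 then p1 - 2 * dz else p1) + 2 * dy)
          ((if p2 ≥ 0 then p2 - 2 * dz else p2) + 2 * dx)

def bresenham_3d (start : Int × Int × Int) (end_ : Int × Int × Int) : List (Int × Int × Int) :=
  let x1 := start.1; let y1 := start.2.1; let z1 := start.2.2
  let x2 := end_.1;  let y2 := end_.2.1;  let z2 := end_.2.2
  let dx := |x2 - x1|; let dy := |y2 - y1|; let dz := |z2 - z1|
  let xs : Int := if x2 > x1 then 1 else -1
  let ys : Int := if y2 > y1 then 1 else -1
  let zs : Int := if z2 > z1 then 1 else -1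
  if dx ≥ dy ∧ dx ≥ dz then
    (x1, y1, z1) :: pvLoopX x2 xs ys zs dx dy dz dx.toNat x1 y1 z1 (2 * dy - dx) (2 * dz - dx)
  else if dy ≥ dx ∧ dy ≥ dz then
    (x1, y1, z1) :: pvLoopY y2 xs ys zs dx dy dz dy.toNat x1 y1 z1 (2 * dx - dy) (2 * dz - dy)
  else
    (x1, y1, z1) :: pvLoopZ z2 xs ys zs dx dy dz dz.toNat x1 y1 z1 (2 * dy - dz) (2 * dx - dz)

-- ===== PORT B =====
def bresenham_3d_alt (start : Int × Int × Int) (end_ : Int × Int × Int) : List (Int × Int × Int) :=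
  let x1 := start.1; let y1 := start.2.1; let z1 := start.2.2
  let x2 := end_.1;  let y2 := end_.2.1;  let z2 := end_.2.2
  let dx := |x2 - x1|; let dy := |y2 - y1|; let dz := |z2 - z1|
  let xs : Int := if x2 > x1 then 1 else -1
  let ys : Int := if y2 > y1 then 1 else -1
  let zs : Int := if z2 > z1 then 1 else -1
  if dx ≥ dy ∧ dx ≥ dz then
    (x1, y1, z1) :: (PySem.List.pyRange 1 (dx + 1) 1).map (fun i =>
      (x1 + xs * i,
       y1 + ys * PySem.Int.floordiv (2 * i * dy + dx) (2 * dx),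
       z1 + zs * PySem.Int.floordiv (2 * i * dz + dx) (2 * dx)))
  else if dy ≥ dx ∧ dy ≥ dz then
    (x1, y1, z1) :: (PySem.List.pyRange 1 (dy + 1) 1).map (fun i =>
      (x1 + xs * PySem.Int.floordiv (2 * i * dx + dy) (2 * dy),
       y1 + ys * i,
       z1 + zs * PySem.Int.floordiv (2 * i * dz + dy) (2 * dy)))
  else
    (x1, y1, z1) :: (PySem.List.pyRange 1 (dz + 1) 1).map (fun i =>
      (x1 + xs * PySem.Int.floordiv (2 * i * dx + dz) (2 * dz),
       y1 + ys * PySem.Int.floordiv (2 * i * dy + dz) (2 * dz),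
       z1 + zs * i))

-- ===== PRECONDITION & SPEC =====
def Spec_bresenham_3d (start : Int × Int × Int) (end_ : Int × Int × Int) (out : List (Int × Int × Int)) : Prop := out = bresenham_3d_alt start end_
instance (start : Int × Int × Int) (end_ : Int × Int × Int) (out : List (Int × Int × Int)) : Decidable (Spec_bresenham_3d start end_ out) := by unfold Spec_bresenham_3d; infer_instance

-- ===== CLAIM (what is proved, stated in full; the proofs are below) =====
def Claim_equal_bresenham_3d : Prop := ∀ (start : Int × Int × Int) (end_ : Int × Int × Int), Dom_bresenham_3d start end_ → Spec_bresenham_3d start end_ (bresenham_3d start end_)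

-- ===== LEMMAS AND PROOFS =====

-- the Bresenham accumulator test `p ≥ 0` decides whether the closed-form floor steps up
lemma pv_qstep (n d i : Int) (hn : 0 < n) (hd : 0 ≤ d) (hdn : d ≤ n) :
    PySem.Int.floordiv (2 * (i + 1) * d + n) (2 * n) =
      if 2 * (i + 1) * d - n - 2 * n * PySem.Int.floordiv (2 * i * d + n) (2 * n) ≥ 0
      then PySem.Int.floordiv (2 * i * d + n) (2 * n) + 1
      else PySem.Int.floordiv (2 * i * d + n) (2 * n) := by
  have hb : (0 : Int) < 2 * n := by omega
  set q := PySem.Int.floordiv (2 * i * d + n) (2 * n) with hq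
  have hch : q * (2 * n) ≤ 2 * i * d + n ∧ 2 * i * d + n < (q + 1) * (2 * n) :=
    (PySem.Int.floordiv_eq_iff_of_pos hb).mp hq.symm
  obtain ⟨h1, h2⟩ := hch
  split_ifs with hcond
  · rw [PySem.Int.floordiv_eq_iff_of_pos hb]
    constructor <;> nlinarith
  · rw [PySem.Int.floordiv_eq_iff_of_pos hb]
    constructor <;> nlinarith

lemma pv_q0 (n d : Int) (hn : 0 < n) :
    PySem.Int.floordiv (2 * (0:Int) * d + n) (2 * n) = 0 := by
  have hb : (0 : Int) < 2 * n := by omega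
  rw [PySem.Int.floordiv_eq_iff_of_pos hb]
  constructor <;> nlinarith

lemma pv_loopX_eq (x1 y1 z1 xs ys zs n dy dz : Int)
    (hn : 0 < n) (hxs : xs = 1 ∨ xs = -1)
    (hdy : 0 ≤ dy) (hdyn : dy ≤ n) (hdz : 0 ≤ dz) (hdzn : dz ≤ n) :
    ∀ (k : Nat) (i : Int), 0 ≤ i → i + k = n →
      pvLoopX (x1 + xs * n) xs ys zs n dy dz k (x1 + xs * i)
        (y1 + ys * PySem.Int.floordiv (2 * i * dy + n) (2 * n))
        (z1 + zs * PySem.Int.floordiv (2 * i * dz + n) (2 * n))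
        (2 * (i + 1) * dy - n - 2 * n * PySem.Int.floordiv (2 * i * dy + n) (2 * n))
        (2 * (i + 1) * dz - n - 2 * n * PySem.Int.floordiv (2 * i * dz + n) (2 * n))
      = (PySem.List.pyRange (i + 1) (n + 1) 1).map (fun j =>
          (x1 + xs * j,
           y1 + ys * PySem.Int.floordiv (2 * j * dy + n) (2 * n),
           z1 + zs * PySem.Int.floordiv (2 * j * dz + n) (2 * n))) := by
  intro k
  induction k with
  | zero =>
    intro i hi hik
    have : i = n := by omega
    subst this
    rw [PySem.List.pyRange_one_eq_nil (by omega)]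
    rfl
  | succ k ih =>
    intro i hi hik
    have hne : x1 + xs * i ≠ x1 + xs * n := by rcases hxs with h | h <;> subst h <;> omega
    have hq2 := pv_qstep n dy i hn hdy hdyn
    have hq3 := pv_qstep n dz i hn hdz hdzn
    rw [PySem.List.pyRange_one_cons (by omega), List.map_cons]
    by_cases h2 : 2 * (i + 1) * dy - n - 2 * n * PySem.Int.floordiv (2 * i * dy + n) (2 * n) >= 0 <;>
      by_cases h3 : 2 * (i + 1) * dz - n - 2 * n * PySem.Int.floordiv (2 * i * dz + n) (2 * n) >= 0
    · have e2 : PySem.Int.floordiv (2 * (i + 1) * dy + n) (2 * n)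
          = PySem.Int.floordiv (2 * i * dy + n) (2 * n) + 1 := by rw [hq2, if_pos h2]
      have e3 : PySem.Int.floordiv (2 * (i + 1) * dz + n) (2 * n)
          = PySem.Int.floordiv (2 * i * dz + n) (2 * n) + 1 := by rw [hq3, if_pos h3]
      simp only [pvLoopX, if_neg hne, h2, h3, ite_true, if_pos]
      rw [← ih (i + 1) (by omega) (by omega), e2, e3]
      congr 1
      · simp only [Prod.mk.injEq]
        first
        | exact ⟨by first | trivial | ring, by first | trivial | ring, by first | trivial | ring⟩
        | exact ⟨by first | trivial | ring, by first | trivial | ring⟩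
        | trivial
      · congr 1 <;> first | rfl | ring
    · have e2 : PySem.Int.floordiv (2 * (i + 1) * dy + n) (2 * n)
          = PySem.Int.floordiv (2 * i * dy + n) (2 * n) + 1 := by rw [hq2, if_pos h2]
      have e3 : PySem.Int.floordiv (2 * (i + 1) * dz + n) (2 * n)
          = PySem.Int.floordiv (2 * i * dz + n) (2 * n) := by rw [hq3, if_neg h3]
      simp only [pvLoopX, if_neg hne, h2, h3, ite_true, ite_false, if_pos, if_neg]
      rw [← ih (i + 1) (by omega) (by omega), e2, e3]
      congr 1
      · simp only [Prod.mk.injEq]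
        first
        | exact ⟨by first | trivial | ring, by first | trivial | ring, by first | trivial | ring⟩
        | exact ⟨by first | trivial | ring, by first | trivial | ring⟩
        | trivial
      · congr 1 <;> first | rfl | ring
    · have e2 : PySem.Int.floordiv (2 * (i + 1) * dy + n) (2 * n)
          = PySem.Int.floordiv (2 * i * dy + n) (2 * n) := by rw [hq2, if_neg h2]
      have e3 : PySem.Int.floordiv (2 * (i + 1) * dz + n) (2 * n)
          = PySem.Int.floordiv (2 * i * dz + n) (2 * n) + 1 := by rw [hq3, if_pos h3]
      simp only [pvLoopX, if_neg hne, h2, h3, ite_true, ite_false, if_pos, if_neg]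
      rw [← ih (i + 1) (by omega) (by omega), e2, e3]
      congr 1
      · simp only [Prod.mk.injEq]
        first
        | exact ⟨by first | trivial | ring, by first | trivial | ring, by first | trivial | ring⟩
        | exact ⟨by first | trivial | ring, by first | trivial | ring⟩
        | trivial
      · congr 1 <;> first | rfl | ring
    · have e2 : PySem.Int.floordiv (2 * (i + 1) * dy + n) (2 * n)
          = PySem.Int.floordiv (2 * i * dy + n) (2 * n) := by rw [hq2, if_neg h2]
      have e3 : PySem.Int.floordiv (2 * (i + 1) * dz + n) (2 * n)
          = PySem.Int.floordiv (2 * i * dz + n) (2 * n) := by rw [hq3, if_neg h3]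
      simp only [pvLoopX, if_neg hne, h2, h3, ite_false, if_neg]
      rw [← ih (i + 1) (by omega) (by omega), e2, e3]
      congr 1
      · simp only [Prod.mk.injEq]
        first
        | exact ⟨by first | trivial | ring, by first | trivial | ring, by first | trivial | ring⟩
        | exact ⟨by first | trivial | ring, by first | trivial | ring⟩
        | trivial
      · congr 1 <;> first | rfl | ring

lemma pv_loopY_eq (x1 y1 z1 xs ys zs n dx dz : Int)
    (hn : 0 < n) (hys : ys = 1 ∨ ys = -1)
    (hdx : 0 ≤ dx) (hdxn : dx ≤ n) (hdz : 0 ≤ dz) (hdzn : dz ≤ n) :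
    ∀ (k : Nat) (i : Int), 0 ≤ i → i + k = n →
      pvLoopY (y1 + ys * n) xs ys zs dx n dz k
        (x1 + xs * PySem.Int.floordiv (2 * i * dx + n) (2 * n))
        (y1 + ys * i)
        (z1 + zs * PySem.Int.floordiv (2 * i * dz + n) (2 * n))
        (2 * (i + 1) * dx - n - 2 * n * PySem.Int.floordiv (2 * i * dx + n) (2 * n))
        (2 * (i + 1) * dz - n - 2 * n * PySem.Int.floordiv (2 * i * dz + n) (2 * n))
      = (PySem.List.pyRange (i + 1) (n + 1) 1).map (fun j =>
          (x1 + xs * PySem.Int.floordiv (2 * j * dx + n) (2 * n),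
           y1 + ys * j,
           z1 + zs * PySem.Int.floordiv (2 * j * dz + n) (2 * n))) := by
  intro k
  induction k with
  | zero =>
    intro i hi hik
    have : i = n := by omega
    subst this
    rw [PySem.List.pyRange_one_eq_nil (by omega)]
    rfl
  | succ k ih =>
    intro i hi hik
    have hne : y1 + ys * i ≠ y1 + ys * n := by rcases hys with h | h <;> subst h <;> omega
    have hq2 := pv_qstep n dx i hn hdx hdxn
    have hq3 := pv_qstep n dz i hn hdz hdzn
    rw [PySem.List.pyRange_one_cons (by omega), List.map_cons]
    by_cases h2 : 2 * (i + 1) * dx - n - 2 * n * PySem.Int.floordiv (2 * i * dx + n) (2 * n) >= 0 <;>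
      by_cases h3 : 2 * (i + 1) * dz - n - 2 * n * PySem.Int.floordiv (2 * i * dz + n) (2 * n) >= 0
    · have e2 : PySem.Int.floordiv (2 * (i + 1) * dx + n) (2 * n)
          = PySem.Int.floordiv (2 * i * dx + n) (2 * n) + 1 := by rw [hq2, if_pos h2]
      have e3 : PySem.Int.floordiv (2 * (i + 1) * dz + n) (2 * n)
          = PySem.Int.floordiv (2 * i * dz + n) (2 * n) + 1 := by rw [hq3, if_pos h3]
      simp only [pvLoopY, if_neg hne, h2, h3, ite_true, ite_false, if_pos, if_neg]
      rw [← ih (i + 1) (by omega) (by omega), e2, e3]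
      congr 1
      · simp only [Prod.mk.injEq]
        first
        | exact ⟨by first | trivial | ring, by first | trivial | ring, by first | trivial | ring⟩
        | exact ⟨by first | trivial | ring, by first | trivial | ring⟩
        | trivial
      · congr 1 <;> first | rfl | ring
    · have e2 : PySem.Int.floordiv (2 * (i + 1) * dx + n) (2 * n)
          = PySem.Int.floordiv (2 * i * dx + n) (2 * n) + 1 := by rw [hq2, if_pos h2]
      have e3 : PySem.Int.floordiv (2 * (i + 1) * dz + n) (2 * n)
          = PySem.Int.floordiv (2 * i * dz + n) (2 * n) := by rw [hq3, if_neg h3]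
      simp only [pvLoopY, if_neg hne, h2, h3, ite_true, ite_false, if_pos, if_neg]
      rw [← ih (i + 1) (by omega) (by omega), e2, e3]
      congr 1
      · simp only [Prod.mk.injEq]
        first
        | exact ⟨by first | trivial | ring, by first | trivial | ring, by first | trivial | ring⟩
        | exact ⟨by first | trivial | ring, by first | trivial | ring⟩
        | trivial
      · congr 1 <;> first | rfl | ring
    · have e2 : PySem.Int.floordiv (2 * (i + 1) * dx + n) (2 * n)
          = PySem.Int.floordiv (2 * i * dx + n) (2 * n) := by rw [hq2, if_neg h2]
      have e3 : PySem.Int.floordiv (2 * (i + 1) * dz + n) (2 * n)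
          = PySem.Int.floordiv (2 * i * dz + n) (2 * n) + 1 := by rw [hq3, if_pos h3]
      simp only [pvLoopY, if_neg hne, h2, h3, ite_true, ite_false, if_pos, if_neg]
      rw [← ih (i + 1) (by omega) (by omega), e2, e3]
      congr 1
      · simp only [Prod.mk.injEq]
        first
        | exact ⟨by first | trivial | ring, by first | trivial | ring, by first | trivial | ring⟩
        | exact ⟨by first | trivial | ring, by first | trivial | ring⟩
        | trivial
      · congr 1 <;> first | rfl | ring
    · have e2 : PySem.Int.floordiv (2 * (i + 1) * dx + n) (2 * n)
          = PySem.Int.floordiv (2 * i * dx + n) (2 * n) := by rw [hq2, if_neg h2]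
      have e3 : PySem.Int.floordiv (2 * (i + 1) * dz + n) (2 * n)
          = PySem.Int.floordiv (2 * i * dz + n) (2 * n) := by rw [hq3, if_neg h3]
      simp only [pvLoopY, if_neg hne, h2, h3, ite_true, ite_false, if_pos, if_neg]
      rw [← ih (i + 1) (by omega) (by omega), e2, e3]
      congr 1
      · simp only [Prod.mk.injEq]
        first
        | exact ⟨by first | trivial | ring, by first | trivial | ring, by first | trivial | ring⟩
        | exact ⟨by first | trivial | ring, by first | trivial | ring⟩
        | trivial
      · congr 1 <;> first | rfl | ring


lemma pv_loopZ_eq (x1 y1 z1 xs ys zs n dx dy : Int)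
    (hn : 0 < n) (hzs : zs = 1 ∨ zs = -1)
    (hdx : 0 ≤ dx) (hdxn : dx ≤ n) (hdy : 0 ≤ dy) (hdyn : dy ≤ n) :
    ∀ (k : Nat) (i : Int), 0 ≤ i → i + k = n →
      pvLoopZ (z1 + zs * n) xs ys zs dx dy n k
        (x1 + xs * PySem.Int.floordiv (2 * i * dx + n) (2 * n))
        (y1 + ys * PySem.Int.floordiv (2 * i * dy + n) (2 * n))
        (z1 + zs * i)
        (2 * (i + 1) * dy - n - 2 * n * PySem.Int.floordiv (2 * i * dy + n) (2 * n))
        (2 * (i + 1) * dx - n - 2 * n * PySem.Int.floordiv (2 * i * dx + n) (2 * n))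
      = (PySem.List.pyRange (i + 1) (n + 1) 1).map (fun j =>
          (x1 + xs * PySem.Int.floordiv (2 * j * dx + n) (2 * n),
           y1 + ys * PySem.Int.floordiv (2 * j * dy + n) (2 * n),
           z1 + zs * j)) := by
  intro k
  induction k with
  | zero =>
    intro i hi hik
    have : i = n := by omega
    subst this
    rw [PySem.List.pyRange_one_eq_nil (by omega)]
    rfl
  | succ k ih =>
    intro i hi hik
    have hne : z1 + zs * i ≠ z1 + zs * n := by rcases hzs with h | h <;> subst h <;> omega
    have hq2 := pv_qstep n dy i hn hdy hdyn
    have hq3 := pv_qstep n dx i hn hdx hdxn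
    rw [PySem.List.pyRange_one_cons (by omega), List.map_cons]
    by_cases h2 : 2 * (i + 1) * dy - n - 2 * n * PySem.Int.floordiv (2 * i * dy + n) (2 * n) >= 0 <;>
      by_cases h3 : 2 * (i + 1) * dx - n - 2 * n * PySem.Int.floordiv (2 * i * dx + n) (2 * n) >= 0
    · have e2 : PySem.Int.floordiv (2 * (i + 1) * dy + n) (2 * n)
          = PySem.Int.floordiv (2 * i * dy + n) (2 * n) + 1 := by rw [hq2, if_pos h2]
      have e3 : PySem.Int.floordiv (2 * (i + 1) * dx + n) (2 * n)
          = PySem.Int.floordiv (2 * i * dx + n) (2 * n) + 1 := by rw [hq3, if_pos h3]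
      simp only [pvLoopZ, if_neg hne, h2, h3, ite_true, ite_false, if_pos, if_neg]
      rw [← ih (i + 1) (by omega) (by omega), e2, e3]
      congr 1
      · simp only [Prod.mk.injEq]
        first
        | exact ⟨by first | trivial | ring, by first | trivial | ring, by first | trivial | ring⟩
        | exact ⟨by first | trivial | ring, by first | trivial | ring⟩
        | trivial
      · congr 1 <;> first | rfl | ring
    · have e2 : PySem.Int.floordiv (2 * (i + 1) * dy + n) (2 * n)
          = PySem.Int.floordiv (2 * i * dy + n) (2 * n) + 1 := by rw [hq2, if_pos h2]
      have e3 : PySem.Int.floordiv (2 * (i + 1) * dx + n) (2 * n)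
          = PySem.Int.floordiv (2 * i * dx + n) (2 * n) := by rw [hq3, if_neg h3]
      simp only [pvLoopZ, if_neg hne, h2, h3, ite_true, ite_false, if_pos, if_neg]
      rw [← ih (i + 1) (by omega) (by omega), e2, e3]
      congr 1
      · simp only [Prod.mk.injEq]
        first
        | exact ⟨by first | trivial | ring, by first | trivial | ring, by first | trivial | ring⟩
        | exact ⟨by first | trivial | ring, by first | trivial | ring⟩
        | trivial
      · congr 1 <;> first | rfl | ring
    · have e2 : PySem.Int.floordiv (2 * (i + 1) * dy + n) (2 * n)
          = PySem.Int.floordiv (2 * i * dy + n) (2 * n) := by rw [hq2, if_neg h2]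
      have e3 : PySem.Int.floordiv (2 * (i + 1) * dx + n) (2 * n)
          = PySem.Int.floordiv (2 * i * dx + n) (2 * n) + 1 := by rw [hq3, if_pos h3]
      simp only [pvLoopZ, if_neg hne, h2, h3, ite_true, ite_false, if_pos, if_neg]
      rw [← ih (i + 1) (by omega) (by omega), e2, e3]
      congr 1
      · simp only [Prod.mk.injEq]
        first
        | exact ⟨by first | trivial | ring, by first | trivial | ring, by first | trivial | ring⟩
        | exact ⟨by first | trivial | ring, by first | trivial | ring⟩
        | trivial
      · congr 1 <;> first | rfl | ring
    · have e2 : PySem.Int.floordiv (2 * (i + 1) * dy + n) (2 * n)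
          = PySem.Int.floordiv (2 * i * dy + n) (2 * n) := by rw [hq2, if_neg h2]
      have e3 : PySem.Int.floordiv (2 * (i + 1) * dx + n) (2 * n)
          = PySem.Int.floordiv (2 * i * dx + n) (2 * n) := by rw [hq3, if_neg h3]
      simp only [pvLoopZ, if_neg hne, h2, h3, ite_true, ite_false, if_pos, if_neg]
      rw [← ih (i + 1) (by omega) (by omega), e2, e3]
      congr 1
      · simp only [Prod.mk.injEq]
        first
        | exact ⟨by first | trivial | ring, by first | trivial | ring, by first | trivial | ring⟩
        | exact ⟨by first | trivial | ring, by first | trivial | ring⟩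
        | trivial
      · congr 1 <;> first | rfl | ring


-- ===== VERDICT (by name: the statement is the Claim_ definition above) =====
theorem bresenham_3d_spec : Claim_equal_bresenham_3d := by
  intro start end_ _
  obtain ⟨x1, y1, z1⟩ := start
  obtain ⟨x2, y2, z2⟩ := end_
  show bresenham_3d _ _ = bresenham_3d_alt _ _
  unfold bresenham_3d bresenham_3d_alt
  dsimp only
  set xs := (if x2 > x1 then (1:Int) else -1) with hxsd
  set ys := (if y2 > y1 then (1:Int) else -1) with hysd
  set zs := (if z2 > z1 then (1:Int) else -1) with hzsd
  have hdx : (0:Int) ≤ |x2 - x1| := abs_nonneg _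
  have hdy : (0:Int) ≤ |y2 - y1| := abs_nonneg _
  have hdz : (0:Int) ≤ |z2 - z1| := abs_nonneg _
  have hxs : xs = 1 ∨ xs = -1 := by rw [hxsd]; split_ifs <;> simp
  have hys : ys = 1 ∨ ys = -1 := by rw [hysd]; split_ifs <;> simp
  have hzs : zs = 1 ∨ zs = -1 := by rw [hzsd]; split_ifs <;> simp
  have hx2 : x2 = x1 + xs * |x2 - x1| := by
    rw [hxsd]; split_ifs with h
    · rw [abs_of_pos (by omega)]; ring
    · rw [abs_of_nonpos (by omega)]; ring
  have hy2 : y2 = y1 + ys * |y2 - y1| := by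
    rw [hysd]; split_ifs with h
    · rw [abs_of_pos (by omega)]; ring
    · rw [abs_of_nonpos (by omega)]; ring
  have hz2 : z2 = z1 + zs * |z2 - z1| := by
    rw [hzsd]; split_ifs with h
    · rw [abs_of_pos (by omega)]; ring
    · rw [abs_of_nonpos (by omega)]; ring
  clear hxsd hysd hzsd
  clear_value xs ys zs
  split_ifs with h1 h2
  · -- dominant x
    rcases eq_or_lt_of_le hdx with h0 | hn
    · rw [← h0]
      norm_num [pvLoopX, PySem.List.pyRange_one_eq_nil]
    · have key := pv_loopX_eq x1 y1 z1 xs ys zs (|x2 - x1|) (|y2 - y1|) (|z2 - z1|) hn hxs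
        hdy h1.1 hdz h1.2 (|x2 - x1|).toNat 0 le_rfl (by omega)
      rw [pv_q0 _ (|y2 - y1|) hn, pv_q0 _ (|z2 - z1|) hn] at key
      rw [← hx2] at key
      congr 1
      convert key using 2 <;> first | rfl | ring
  · -- dominant y
    rcases eq_or_lt_of_le hdy with h0 | hn
    · rw [← h0]
      norm_num [pvLoopY, PySem.List.pyRange_one_eq_nil]
    · have key := pv_loopY_eq x1 y1 z1 xs ys zs (|y2 - y1|) (|x2 - x1|) (|z2 - z1|) hn hys
        hdx h2.1 hdz h2.2 (|y2 - y1|).toNat 0 le_rfl (by omega)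
      rw [pv_q0 _ (|x2 - x1|) hn, pv_q0 _ (|z2 - z1|) hn] at key
      rw [← hy2] at key
      congr 1
      convert key using 2 <;> first | rfl | ring
  · -- dominant z
    push Not at h1 h2
    have hb : |x2 - x1| ≤ |z2 - z1| ∧ |y2 - y1| ≤ |z2 - z1| := by
      by_cases hc : |y2 - y1| ≤ |x2 - x1|
      · have := h1 hc; constructor <;> linarith
      · have hc' : |x2 - x1| ≤ |y2 - y1| := by linarith
        have := h2 hc'; constructor <;> linarith
    have hn : (0:Int) < |z2 - z1| := by
      by_cases hc : |y2 - y1| ≤ |x2 - x1|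
      · have := h1 hc; linarith
      · have hc' : |x2 - x1| ≤ |y2 - y1| := by linarith
        have := h2 hc'; linarith
    have key := pv_loopZ_eq x1 y1 z1 xs ys zs (|z2 - z1|) (|x2 - x1|) (|y2 - y1|) hn hzs
      hdx hb.1 hdy hb.2 (|z2 - z1|).toNat 0 le_rfl (by omega)
    rw [pv_q0 _ (|x2 - x1|) hn, pv_q0 _ (|y2 - y1|) hn] at key
    rw [← hz2] at key
    congr 1
    convert key using 2 <;> first | rfl | ring
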